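-- pv_equiv track=rewrite | github.com/alexandraback/datacollection | solutions_5634697451274240_0/Python/RinMin/pb.py | num_flips
-- ===== SOURCE A (Python) =====
-- def all_flipped(stack):
-- 	for p in stack:
-- 		if p == '-':
-- 			return False
-- 	return True
--
-- def flip(stack, n):
-- 	new_stack = list(stack)
-- 	for i in range(0, n):
-- 		if stack[i] == '-':
-- 			new_stack[n-i-1] = '+'
-- 		else:
-- 			new_stack[n-i-1] = '-'
-- 	return new_stack
--
-- def num_same(stack, face, forward):
-- 	count = 0
-- 	if not forward:
-- 		stack = reversed(stack)
-- 	for p in stack: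
-- 		if p == face:
-- 			count = count + 1
-- 		else:
-- 			return count
-- 	return len(stack)
--
-- def num_flips(stack):
-- 	i = 0
-- 	while not all_flipped(stack):
-- 		if stack[0] == '-':
-- 			count = num_same(stack, '+', False)
-- 			stack = flip(stack, len(stack) - count)
-- 		else:
-- 			count = num_same(stack, '+', True)
-- 			stack = flip(stack, count)
-- 		i = i + 1
--
-- 	return i
-- ===== SOURCE B (Python) =====
-- def num_flips(stack):
--     runs = 0
--     prev_minus = False
--     for p in stack:
--         m = p == '-'
--         if m and not prev_minus:
--             runs += 1
--         prev_minus = m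
--     first_minus = bool(stack) and stack[0] == '-'
--     return 2 * runs - (1 if first_minus else 0)
-- ===== Notes on version B (the rewrite author's own statement) =====
-- stated objective: alternative
-- what changed: Replaces A's simulation loop (repeatedly scanning for the run length and rebuilding the flipped prefix until no '-' remains) with a single pass computing 2*(number of maximal runs of '-') minus 1 if the first element is '-'.
-- outside the precondition, e.g. on num_flips(['-', 'x']): A returns 2, B returns 1; on num_flips(['x', '-']): A does not finish within the time limit, B returns 2
import Mathlib
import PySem

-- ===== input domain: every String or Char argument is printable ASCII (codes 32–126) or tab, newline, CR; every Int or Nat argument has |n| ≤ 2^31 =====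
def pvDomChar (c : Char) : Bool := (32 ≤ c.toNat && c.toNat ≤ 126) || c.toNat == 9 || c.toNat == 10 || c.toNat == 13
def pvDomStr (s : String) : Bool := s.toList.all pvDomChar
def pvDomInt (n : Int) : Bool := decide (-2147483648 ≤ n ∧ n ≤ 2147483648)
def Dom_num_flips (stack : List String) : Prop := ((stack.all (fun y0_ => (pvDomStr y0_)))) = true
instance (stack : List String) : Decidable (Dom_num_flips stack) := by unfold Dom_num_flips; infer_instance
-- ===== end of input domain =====

-- B replaces A's repeated flip-simulation loop by a single pass computing
-- 2*(number of maximal runs of '-') minus 1 if the first element is '-'.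

-- ===== PORT A =====
def all_flipped (stack : List String) : Bool :=
  match stack with
  | [] => true
  | p :: rest => if p = "-" then false else all_flipped rest

-- `new_stack[n-i-1] = …` / `stack[i]`: pySetD / pyGetD are exact for in-range indices;
-- A only indexes in range (0 ≤ i < n ≤ len stack in every call reached under Pre_).
def flipList (stack : List String) (n : Int) : List String :=
  (PySem.List.pyRange 0 n 1).foldl
    (fun new_stack i =>
      if PySem.List.pyGetD stack i "" = "-" then PySem.List.pySetD new_stack (n - i - 1) "+"
      else PySem.List.pySetD new_stack (n - i - 1) "-")
    stack

def num_same_go (l : List String) (face : String) (count : Int) (total : Int) : Int :=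
  match l with
  | [] => total
  | p :: rest => if p = face then num_same_go rest face (count + 1) total else count

-- `total` is returned when the loop exhausts the iterable; in the backward case Python's
-- `len(reversed(stack))` would raise TypeError, but num_flips never reaches it (the backward
-- call happens only when stack[0] == '-', so the reversed scan always stops early).
def num_same (stack : List String) (face : String) (forward : Bool) : Int :=
  num_same_go (if forward then stack else stack.reverse) face 0 (stack.length : Int)

-- fuel = stack.length + 1 makes the while-loop total; under Pre_ the loop always terminates
-- before the fuel runs out (proved below), so this is exactly A's loop.
def num_flips_loop (fuel : Nat) (stack : List String) (i : Int) : Int :=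
  match fuel with
  | 0 => i
  | fuel + 1 =>
    if all_flipped stack then i
    else if PySem.List.pyGetD stack 0 "" = "-" then
      num_flips_loop fuel (flipList stack ((stack.length : Int) - num_same stack "+" false)) (i + 1)
    else
      num_flips_loop fuel (flipList stack (num_same stack "+" true)) (i + 1)

def num_flips (stack : List String) : Int :=
  num_flips_loop (stack.length + 1) stack 0

-- ===== PORT B =====
def num_flips_alt (stack : List String) : Int :=
  let st := stack.foldl
    (fun st p => (st.1 + (if p = "-" ∧ st.2 = false then 1 else 0), decide (p = "-")))
    ((0 : Int), false)
  let first_minus := stack.head? = some "-"   -- bool(stack) and stack[0] == '-'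
  2 * st.1 - (if first_minus then 1 else 0)

-- ===== PRECONDITION & SPEC =====
-- Pre_ excludes stacks that contain '-' together with a non-sign element: on those A
-- diverges when such an element precedes the first '-' (e.g. ['x','-']) and otherwise
-- returns a count accidental to flip's renormalisation of foreign symbols to '-'
-- (e.g. ['-','x'] gives 2), while B just reads the signs.
def Pre_num_flips (stack : List String) : Prop :=
  (∀ s ∈ stack, s ≠ "-") ∨ (∀ s ∈ stack, s = "+" ∨ s = "-")
instance (stack : List String) : Decidable (Pre_num_flips stack) := by unfold Pre_num_flips; infer_instance

def pvWitness_num_flips : List String := ["-", "+", "-", "+"]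

def Spec_num_flips (stack : List String) (out : Int) : Prop := out = num_flips_alt stack
instance (stack : List String) (out : Int) : Decidable (Spec_num_flips stack out) := by unfold Spec_num_flips; infer_instance

-- ===== CLAIM (what is proved, stated in full; the proofs are below) =====
def Claim_equal_num_flips : Prop := ∀ (stack : List String), Dom_num_flips stack → Pre_num_flips stack → Spec_num_flips stack (num_flips stack)

-- ===== LEMMAS AND PROOFS =====

-- proof-side measure: transitions-after-prev + 1 if the last sign is '-'
def pneg (s : String) : String := if s = "-" then "+" else "-"

def transF (p : String) : List String → Int
  | [] => 0
  | a :: r => (if p = a then 0 else 1) + transF a r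

def mval (l : List String) : Int :=
  match l with
  | [] => 0
  | a :: r => transF a r + (if (a :: r).getLastD "" = "-" then 1 else 0)

def Sign (l : List String) : Prop := ∀ s ∈ l, s = "+" ∨ s = "-"

def leadRun (face : String) : List String → Nat
  | [] => 0
  | a :: r => if a = face then leadRun face r + 1 else 0

theorem transF_nonneg (p : String) (l : List String) : 0 ≤ transF p l := by
  induction l generalizing p with
  | nil => simp [transF]
  | cons a r ih => simp only [transF]; have := ih a; split_ifs <;> omega

theorem transF_le (p : String) (l : List String) : transF p l ≤ l.length := by
  induction l generalizing p with
  | nil => simp [transF]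
  | cons a r ih => simp only [transF, List.length_cons]; have := ih a; split_ifs <;> omega

theorem mval_nonneg (l : List String) : 0 ≤ mval l := by
  cases l with
  | nil => simp [mval]
  | cons a r => simp only [mval]; have := transF_nonneg a r; split_ifs <;> omega

theorem mval_le (l : List String) : mval l ≤ l.length := by
  cases l with
  | nil => simp [mval]
  | cons a r => simp only [mval, List.length_cons]; have := transF_le a r; split_ifs <;> omega

-- all_flipped characterisation
theorem all_flipped_iff (s : List String) : all_flipped s = true ↔ ∀ x ∈ s, x ≠ "-" := by
  induction s with
  | nil => simp [all_flipped]
  | cons a r ih => simp only [all_flipped]; split_ifs with h <;> simp_all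

theorem transF_all_plus (l : List String) (p : String) (h : ∀ x ∈ l, x = "+")
    (hp : p = "+") : transF p l = 0 := by
  induction l generalizing p with
  | nil => simp [transF]
  | cons b q ih =>
    have hb : b = "+" := h b (by simp)
    simp only [transF]
    rw [ih b (fun x hx => h x (by simp [hx])) hb, hp, hb]
    simp

theorem mval_all_plus (s : List String) (h : ∀ x ∈ s, x = "+") : mval s = 0 := by
  cases s with
  | nil => simp [mval]
  | cons a r =>
    simp only [mval]
    rw [transF_all_plus r a (fun x hx => h x (by simp [hx])) (h a (by simp))]
    have hl : (a :: r).getLast?.getD "" = "+" := by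
      rw [List.getLast?_eq_some_getLast (List.cons_ne_nil a r)]
      exact h _ (List.getLast_mem _)
    simp [List.getLastD_eq_getLast?, hl]

-- num_same characterisation
theorem num_same_go_eq (face : String) (l : List String) (c total : Int)
    (h : ∃ x ∈ l, x ≠ face) : num_same_go l face c total = c + (leadRun face l : Int) := by
  induction l generalizing c with
  | nil => simp at h
  | cons a r ih =>
    simp only [num_same_go, leadRun]
    by_cases ha : a = face
    · subst ha
      have : ∃ x ∈ r, x ≠ a := by rcases h with ⟨x, hx, hne⟩; cases hx with
        | head => exact absurd rfl hne
        | tail _ hm => exact ⟨x, hm, hne⟩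
      rw [if_pos rfl, ih _ this]; simp; push_cast; ring
    · simp [ha]

theorem leadRun_decomp (face : String) (l : List String) :
    l = List.replicate (leadRun face l) face ++ l.drop (leadRun face l) := by
  induction l with
  | nil => simp [leadRun]
  | cons a r ih =>
    by_cases ha : a = face
    · subst ha
      have hstep : leadRun a (a :: r) = leadRun a r + 1 := by simp [leadRun]
      rw [hstep, List.replicate_succ, List.cons_append, List.drop_succ_cons]
      exact congrArg _ ih
    · simp [leadRun, ha]

theorem leadRun_drop_head (face : String) (l : List String) :
    l.drop (leadRun face l) = [] ∨ ∃ y r, l.drop (leadRun face l) = y :: r ∧ y ≠ face := by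
  induction l with
  | nil => simp
  | cons a r ih =>
    simp only [leadRun]
    by_cases ha : a = face
    · simpa [ha] using ih
    · exact Or.inr ⟨a, r, by simp [ha], ha⟩

theorem leadRun_lt (face : String) (l : List String) (h : ∃ x ∈ l, x ≠ face) :
    leadRun face l < l.length := by
  induction l with
  | nil => simp at h
  | cons a r ih =>
    by_cases ha : a = face
    · subst ha
      have hex : ∃ x ∈ r, x ≠ a := by rcases h with ⟨x, hx, hne⟩; cases hx with
        | head => exact absurd rfl hne
        | tail _ hm => exact ⟨x, hm, hne⟩
      have := ih hex
      have hstep : leadRun a (a :: r) = leadRun a r + 1 := by simp [leadRun]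
      rw [hstep, List.length_cons]
      omega
    · simp [leadRun, ha]

-- flipList characterisation
theorem flip_foldl_general (stack : List String) (N : Nat) (hN : N ≤ stack.length) :
    ∀ (a : Nat) (cur : List String), a ≤ N → cur.length = stack.length →
    (PySem.List.pyRange (a : Int) (N : Int) 1).foldl
      (fun new_stack i =>
        if PySem.List.pyGetD stack i "" = "-" then PySem.List.pySetD new_stack ((N : Int) - i - 1) "+"
        else PySem.List.pySetD new_stack ((N : Int) - i - 1) "-")
      cur
      = ((stack.drop a).take (N - a)).reverse.map pneg ++ cur.drop (N - a) := by
  intro a cur ha hc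
  induction hd : N - a generalizing a cur with
  | zero =>
    rw [PySem.List.pyRange_one_eq_nil (by omega : (N : Int) ≤ (a : Int))]
    have h0 : N - a = 0 := hd
    simp [h0]
  | succ k ih =>
    have haN : a < N := by omega
    rw [PySem.List.pyRange_one_cons (show (a : Int) < (N : Int) by exact_mod_cast haN)]
    simp only [List.foldl_cons]
    have hlt : a < stack.length := by omega
    have hidx : ((N : Int) - (a : Int) - 1) = ((k : Nat) : Int) := by push_cast; omega
    have hget : PySem.List.pyGetD stack (a : Int) "" = stack[a] := by
      rw [PySem.List.pyGetD_eq_getElem stack "" (by omega) (by exact_mod_cast hlt)]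
      simp
    have hstep : (if PySem.List.pyGetD stack (a : Int) "" = "-" then PySem.List.pySetD cur ((N : Int) - (a : Int) - 1) "+"
        else PySem.List.pySetD cur ((N : Int) - (a : Int) - 1) "-")
        = cur.set k (pneg stack[a]) := by
      rw [hget, hidx]
      split_ifs with h1 <;> simp [PySem.List.pySetD_natCast, pneg, h1]
    rw [hstep]
    have h1 : ((a : Int) + 1) = ((a + 1 : Nat) : Int) := by push_cast; ring
    rw [h1, ih (a + 1) _ (by omega) (by simp [hc]) (by omega)]
    have hkc : k < cur.length := by omega
    have hdrop : (cur.set k (pneg stack[a])).drop k = pneg stack[a] :: cur.drop (k + 1) := by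
      rw [List.drop_eq_getElem_cons (by simpa using hkc), List.getElem_set_self,
        List.drop_set_of_lt (by omega)]
    have htake : (stack.drop a).take (k + 1) = stack[a] :: ((stack.drop (a + 1)).take k) := by
      rw [List.drop_eq_getElem_cons hlt, List.take_succ_cons]
    rw [hdrop, htake]
    simp

theorem flip_eq (stack : List String) (N : Nat) (hN : N ≤ stack.length) :
    flipList stack (N : Int) = ((stack.take N).reverse.map pneg) ++ stack.drop N := by
  have := flip_foldl_general stack N hN 0 stack (by omega) rfl
  simpa using this

-- transF structure lemmas
theorem transF_append (p : String) (l l' : List String) :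
    transF p (l ++ l') = transF p l + transF (l.getLastD p) l' := by
  induction l generalizing p with
  | nil => simp [transF]
  | cons a r ih =>
    simp only [List.cons_append, transF, ih a]
    have : (a :: r).getLastD p = r.getLastD a := by
      cases r <;> simp [List.getLastD]
    rw [this]; ring

theorem getLastD_replicate (c : Nat) (x p : String) (hc : 0 < c) :
    (List.replicate c x).getLastD p = x := by
  induction c with
  | zero => omega
  | succ k ih =>
    cases k with
    | zero => simp [List.replicate, List.getLastD]
    | succ j => rw [List.replicate_succ]; simpa [List.getLastD] using ih (by omega)

theorem transF_replicate (c : Nat) (x : String) : transF x (List.replicate c x) = 0 := by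
  induction c with
  | zero => simp [transF]
  | succ k ih => rw [List.replicate_succ]; simp [transF, ih]

theorem getLastD_append (p : String) (l l' : List String) (h : l' ≠ []) :
    (l ++ l').getLastD p = l'.getLastD p := by
  rw [List.getLastD_eq_getLast?, List.getLastD_eq_getLast?, List.getLast?_append_of_ne_nil l h]

theorem getLastD_map_pneg (l : List String) (p : String) :
    (l.map pneg).getLastD (pneg p) = pneg (l.getLastD p) := by
  induction l generalizing p with
  | nil => simp
  | cons a r ih => cases r <;> simp_all [List.getLastD]

theorem transF_map_pneg (p : String) (l : List String) (hp : p = "+" ∨ p = "-")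
    (hl : Sign l) : transF (pneg p) (l.map pneg) = transF p l := by
  induction l generalizing p with
  | nil => simp [transF]
  | cons a r ih =>
    have ha : a = "+" ∨ a = "-" := hl a (by simp)
    have hr : Sign r := fun x hx => hl x (by simp [hx])
    simp only [List.map_cons, transF, ih a ha hr]
    have : (pneg p = pneg a) ↔ (p = a) := by
      rcases hp with h | h <;> rcases ha with h' | h' <;> subst h <;> subst h' <;> simp [pneg]
    rcases (em (p = a)) with h | h <;> simp [h, this]

-- trans of reverse: stated via mval with last adjusted; we use a direct helper T
def Tval (l : List String) : Int :=
  match l with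
  | [] => 0
  | a :: r => transF a r

theorem Tval_append_singleton (l : List String) (x : String) (h : l ≠ []) :
    Tval (l ++ [x]) = Tval l + (if l.getLastD "" = x then 0 else 1) := by
  cases l with
  | nil => simp at h
  | cons a r =>
    simp only [Tval, List.cons_append, transF_append]
    have : (a :: r).getLastD "" = r.getLastD a := by cases r <;> simp [List.getLastD]
    rw [this]
    simp [transF]

theorem Tval_reverse (l : List String) : Tval l.reverse = Tval l := by
  induction l with
  | nil => simp
  | cons a r ih =>
    cases hr : r with
    | nil => simp [Tval]
    | cons b q =>
      rw [← hr]
      have hrne : r.reverse ≠ [] := by simp [hr]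
      rw [List.reverse_cons, Tval_append_singleton _ _ hrne, ih]
      have hlast : r.reverse.getLastD "" = b := by
        rw [List.getLastD_eq_getLast?, List.getLast?_reverse, hr]; simp
      rw [hlast, hr]
      simp only [Tval, transF]
      by_cases h : a = b
      · simp [h]
      · rw [if_neg h, if_neg (fun hh : b = a => h hh.symm)]; ring

theorem Tval_map_pneg (l : List String) (hl : Sign l) : Tval (l.map pneg) = Tval l := by
  cases l with
  | nil => simp [Tval]
  | cons a r =>
    simp only [List.map_cons, Tval]
    exact transF_map_pneg a r (hl a (by simp)) (fun x hx => hl x (by simp [hx]))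

theorem mval_eq_Tval (l : List String) :
    mval l = Tval l + (if l.getLastD "" = "-" ∧ l ≠ [] then 1 else 0) := by
  cases l with
  | nil => simp [mval, Tval]
  | cons a r => simp [mval, Tval]

theorem getLastD_replicate_self (k : Nat) (x : String) : (List.replicate k x).getLastD x = x := by
  cases k with
  | zero => simp
  | succ j => exact getLastD_replicate _ _ _ (by omega)

-- replicate-prefix measure lemma
theorem mval_replicate_cons (c : Nat) (x y : String) (r : List String) (hc : 0 < c) :
    mval (List.replicate c x ++ y :: r) = (if x = y then 0 else 1) + mval (y :: r) := by
  obtain ⟨k, hk⟩ : ∃ k, c = k + 1 := ⟨c - 1, by omega⟩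
  subst hk
  rw [List.replicate_succ, List.cons_append]
  simp only [mval]
  rw [transF_append, transF_replicate, getLastD_replicate_self]
  have : (x :: (List.replicate k x ++ y :: r)).getLastD "" = (y :: r).getLastD "" := by
    rw [show (x :: (List.replicate k x ++ y :: r)) = (x :: List.replicate k x) ++ (y :: r) by simp,
      getLastD_append _ _ _ (by simp)]
  rw [this]
  simp only [transF]
  ring

-- the step taken by A's loop decreases mval by exactly 1 and preserves Sign
theorem exists_minus_of_not_all_flipped (s : List String) (h : ¬ all_flipped s = true) :
    ∃ x ∈ s, x = "-" := by
  by_contra hc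
  push_neg at hc
  exact h ((all_flipped_iff s).2 hc)

theorem getLastD_cons (a x : String) (r : List String) :
    (a :: r).getLastD x = r.getLastD a := by
  cases r <;> simp [List.getLastD]

theorem getLastD_irrel (l : List String) (h : l ≠ []) (d d' : String) :
    l.getLastD d = l.getLastD d' := by
  rw [List.getLastD_eq_getLast?, List.getLastD_eq_getLast?, List.getLast?_eq_some_getLast h]
  simp

theorem Tval_append (l l' : List String) (h : l ≠ []) :
    Tval (l ++ l') = Tval l + transF (l.getLastD "") l' := by
  cases l with
  | nil => simp at h
  | cons a r =>
    simp only [List.cons_append, Tval, transF_append, getLastD_cons]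

theorem transF_replicate_gen (p x : String) (t : Nat) :
    transF p (List.replicate t x) = if t = 0 then 0 else if p = x then 0 else 1 := by
  cases t with
  | zero => simp [transF]
  | succ k =>
    rw [List.replicate_succ]
    simp only [transF, transF_replicate]
    simp

theorem num_same_fwd_eq (s : List String) (h : ∃ x ∈ s, x ≠ "+") :
    num_same s "+" true = ((leadRun "+" s : Nat) : Int) := by
  have h1 : num_same s "+" true = num_same_go s "+" 0 (s.length : Int) := by
    simp [num_same]
  rw [h1, num_same_go_eq "+" s 0 _ h]
  simp

theorem num_same_bwd_eq (s : List String) (h : ∃ x ∈ s.reverse, x ≠ "+") :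
    num_same s "+" false = ((leadRun "+" s.reverse : Nat) : Int) := by
  have h1 : num_same s "+" false = num_same_go s.reverse "+" 0 (s.length : Int) := by
    simp [num_same]
  rw [h1, num_same_go_eq "+" s.reverse 0 _ h]
  simp

theorem step_fwd (s : List String) (hs : Sign s) (hm : ∃ x ∈ s, x = "-")
    (hhead : PySem.List.pyGetD s 0 "" = "+") :
    Sign (flipList s (num_same s "+" true)) ∧
      mval (flipList s (num_same s "+" true)) = mval s - 1 := by
  have hne : ∃ x ∈ s, x ≠ "+" := by
    rcases hm with ⟨x, hx, hx2⟩; exact ⟨x, hx, by simp [hx2]⟩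
  have hns := num_same_fwd_eq s hne
  set c := leadRun "+" s with hc
  have hclt : c < s.length := leadRun_lt "+" s hne
  have hdec := leadRun_decomp "+" s
  rcases leadRun_drop_head "+" s with hnil | ⟨y, r, hyr, hy⟩
  · -- drop = [] contradicts c < length
    exfalso
    have := congrArg List.length hdec
    simp [hnil] at this
    omega
  rw [← hc] at hdec hyr
  have hymem : y ∈ s := by
    have : y ∈ s.drop c := by rw [hyr]; simp
    exact List.mem_of_mem_drop this
  have hy2 : y = "-" := by rcases hs y hymem with h | h; exact absurd h hy; exact h
  -- c ≥ 1 since the head is "+"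
  obtain ⟨a, tl, rfl⟩ := List.exists_cons_of_ne_nil (by rintro rfl; simp at hm : s ≠ ([] : List String))
  have ha : a = "+" := by rwa [PySem.List.pyGetD_zero_cons] at hhead
  have hcpos : 0 < c := by
    rw [hc, ha]
    simp [leadRun]
  have htake : (a :: tl).take c = List.replicate c "+" := by
    conv_lhs => rw [hdec]
    exact List.take_left' (by simp)

  have hfe : flipList (a :: tl) (num_same (a :: tl) "+" true)
      = List.replicate c "-" ++ (y :: r) := by
    rw [hns, flip_eq _ c (by omega), htake, ← hyr, List.reverse_replicate,
      List.map_replicate]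
    simp [pneg]
  constructor
  · rw [hfe]
    intro x hx
    rcases List.mem_append.1 hx with h | h
    · right; exact List.eq_of_mem_replicate h
    · exact hs x (by rw [hdec, hyr]; exact List.mem_append_right _ h)
  · rw [hfe, mval_replicate_cons c _ _ _ hcpos]
    conv_rhs => rw [hdec, hyr, mval_replicate_cons c _ _ _ hcpos]
    rw [hy2]
    simp

theorem step_bwd (s : List String) (hs : Sign s) (hm : ∃ x ∈ s, x = "-")
    (hhead : PySem.List.pyGetD s 0 "" = "-") :
    Sign (flipList s ((s.length : Int) - num_same s "+" false)) ∧
      mval (flipList s ((s.length : Int) - num_same s "+" false)) = mval s - 1 := by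
  obtain ⟨a, tl, rfl⟩ := List.exists_cons_of_ne_nil (by rintro rfl; simp at hm : s ≠ ([] : List String))
  set s := a :: tl with hsdef
  have ha : a = "-" := by rwa [PySem.List.pyGetD_zero_cons] at hhead
  have hne : ∃ x ∈ s.reverse, x ≠ "+" := ⟨a, by simp [hsdef], by simp [ha]⟩
  have hns := num_same_bwd_eq s hne
  set t := leadRun "+" s.reverse with ht
  have htlt : t < s.length := by
    have := leadRun_lt "+" s.reverse hne
    simpa using this
  have hdec := leadRun_decomp "+" s.reverse
  rw [← ht] at hdec
  set u := s.reverse.drop t with hu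
  have hulen : u.length = s.length - t := by simp [hu]
  have hune : u ≠ [] := by
    have : 0 < u.length := by omega
    exact List.ne_nil_of_length_pos this
  obtain ⟨y, q, hyq⟩ := List.exists_cons_of_ne_nil hune
  have hyne : y ≠ "+" := by
    rcases leadRun_drop_head "+" s.reverse with hnil | ⟨y', r', hyr', hy'⟩
    · rw [← ht, ← hu] at hnil; simp [hnil] at hyq
    · rw [← ht, ← hu] at hyr'; rw [hyq] at hyr'
      injection hyr' with h1 _
      rwa [h1]
  have husign : Sign u := by
    intro x hx
    exact hs x (by
      have : x ∈ s.reverse := List.mem_of_mem_drop (hu ▸ hx)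
      simpa using this)
  have hy2 : y = "-" := by
    rcases husign y (by simp [hyq]) with h | h; exact absurd h hyne; exact h
  -- s = u.reverse ++ replicate t "+"
  have hsplit : s = u.reverse ++ List.replicate t "+" := by
    conv_lhs => rw [← List.reverse_reverse s]
    rw [hdec]
    simp [List.reverse_append]
  have hurev_ne : u.reverse ≠ ([] : List String) := by simpa using hune
  -- the last element of u is the head of s, namely "-"
  have hulast : u.getLastD "" = "-" := by
    have h1 : u.reverse.headD "" = u.getLastD "" := by
      rw [List.headD_eq_head?, List.getLastD_eq_getLast?, List.head?_reverse]
    have h2 : s.headD "" = u.reverse.headD "" := by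
      rw [hsplit, List.headD_eq_head?, List.headD_eq_head?,
        List.head?_append_of_ne_nil _ hurev_ne]
    rw [← h1, ← h2, hsdef]
    simp [ha]
  -- compute the flip
  have hcast : ((s.length : Int) - num_same s "+" false) = (((s.length - t : Nat) : Nat) : Int) := by
    rw [hns]; push_cast; omega
  have htake2 : s.take (s.length - t) = u.reverse := by
    conv_lhs => rw [hsplit]
    exact List.take_left' (by simp [hulen])
  have hdrop2 : s.drop (s.length - t) = List.replicate t "+" := by
    conv_lhs => rw [hsplit]
    exact List.drop_left' (by simp [hulen])
  have hfe : flipList s ((s.length : Int) - num_same s "+" false)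
      = u.map pneg ++ List.replicate t "+" := by
    rw [hcast, flip_eq _ _ (by omega), htake2, hdrop2, List.reverse_reverse]
  have humapne : u.map pneg ≠ ([] : List String) := by simpa using hune
  constructor
  · rw [hfe]
    intro x hx
    rcases List.mem_append.1 hx with h | h
    · rcases List.mem_map.1 h with ⟨z, _, hz⟩
      subst hz
      by_cases hz2 : z = "-" <;> simp [pneg, hz2]
    · left; exact List.eq_of_mem_replicate h
  -- measure computation via Tval
  · have hmapLast : (u.map pneg).getLastD "" = "+" := by
      rw [getLastD_irrel _ humapne "" (pneg ""), getLastD_map_pneg, hulast]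
      simp [pneg]
    have hrevLast : u.reverse.getLastD "" = "-" := by
      rw [List.getLastD_eq_getLast?, List.getLast?_reverse, ← List.headD_eq_head?, hyq]
      simp [hy2]
    have hTrev : Tval u.reverse = Tval u := Tval_reverse u
    have hTmap : Tval (u.map pneg) = Tval u := Tval_map_pneg u husign
    have hlast_s : s.getLastD "" = (if t = 0 then "-" else "+") := by
      rw [hsplit]
      cases ht0 : t with
      | zero => simpa [ht0] using hrevLast
      | succ k =>
        rw [getLastD_append _ _ _ (by simp), getLastD_replicate _ _ _ (by omega)]
        simp
    have hlast_new : (u.map pneg ++ List.replicate t "+").getLastD "" = "+" := by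
      cases ht0 : t with
      | zero => simpa [ht0] using hmapLast
      | succ k => rw [getLastD_append _ _ _ (by simp), getLastD_replicate _ _ _ (by omega)]
    have hTs : Tval s = Tval u + (if t = 0 then 0 else 1) := by
      rw [hsplit, Tval_append _ _ hurev_ne, hrevLast, hTrev, transF_replicate_gen]
      simp
    have hTnew : Tval (u.map pneg ++ List.replicate t "+") = Tval u := by
      rw [Tval_append _ _ humapne, hmapLast, hTmap, transF_replicate_gen]
      simp
    rw [hfe, mval_eq_Tval, mval_eq_Tval, hTnew, hTs, hlast_new, hlast_s]
    have hsne2 : s ≠ ([] : List String) := by simp [hsdef]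
    have hnewne : u.map pneg ++ List.replicate t "+" ≠ ([] : List String) := by
      simp [humapne]
    cases ht0 : t with
    | zero => simp [hsne2, hnewne]
    | succ k => simp [hsne2, hnewne]

theorem loop_eq (fuel : Nat) : ∀ (s : List String) (i : Int), Sign s → mval s < fuel →
    num_flips_loop fuel s i = i + mval s := by
  induction fuel with
  | zero =>
    intro s i _ h
    have := mval_nonneg s
    omega
  | succ f ih =>
    intro s i hs h
    by_cases hall : all_flipped s = true
    · have h0 : mval s = 0 := mval_all_plus s (fun x hx => by
        rcases hs x hx with h1 | h1
        · exact h1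
        · exact absurd h1 ((all_flipped_iff s).1 hall x hx))
      simp [num_flips_loop, hall, h0]
    · have hm := exists_minus_of_not_all_flipped s hall
      obtain ⟨a, tl, rfl⟩ := List.exists_cons_of_ne_nil
        (by rintro rfl; simp at hm : s ≠ ([] : List String))
      rcases hs a (by simp) with hA | hA
      · -- head "+": forward branch
        have hhead : PySem.List.pyGetD (a :: tl) 0 "" = "+" := by
          rw [PySem.List.pyGetD_zero_cons, hA]
        obtain ⟨hsgn, hmv⟩ := step_fwd (a :: tl) hs hm hhead
        simp only [num_flips_loop, if_neg hall, hhead]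
        rw [if_neg (by simp), ih _ (i + 1) hsgn (by omega), hmv]
        ring
      · -- head "-": backward branch
        have hhead : PySem.List.pyGetD (a :: tl) 0 "" = "-" := by
          rw [PySem.List.pyGetD_zero_cons, hA]
        obtain ⟨hsgn, hmv⟩ := step_bwd (a :: tl) hs hm hhead
        simp only [num_flips_loop, if_neg hall, hhead, if_pos]
        rw [ih _ (i + 1) hsgn (by omega), hmv]
        ring

-- B-side: the fold counts maximal runs of "-"
def runsF (prev : Bool) : List String → Int
  | [] => 0
  | p :: r => (if p = "-" ∧ prev = false then 1 else 0) + runsF (decide (p = "-")) r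

theorem foldl_runsF (l : List String) (acc : Int) (prev : Bool) :
    (l.foldl (fun st p => (st.1 + (if p = "-" ∧ st.2 = false then 1 else 0), decide (p = "-")))
      ((acc, prev) : Int × Bool)).1 = acc + runsF prev l := by
  induction l generalizing acc prev with
  | nil => simp [runsF]
  | cons p r ih => simp only [List.foldl_cons, runsF, ih]; ring

theorem runsF_no_minus (l : List String) (h : ∀ x ∈ l, x ≠ "-") (prev : Bool) :
    runsF prev l = 0 := by
  induction l generalizing prev with
  | nil => simp [runsF]
  | cons p r ih =>
    have hp : p ≠ "-" := h p (by simp)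
    simp only [runsF, ih (fun x hx => h x (by simp [hx]))]
    simp [hp]

theorem two_runsF (l : List String) (hl : Sign l) (p : String) (hp : p = "+" ∨ p = "-") :
    2 * runsF (decide (p = "-")) l
      = transF p l + (if l.getLastD p = "-" then 1 else 0) - (if p = "-" then 1 else 0) := by
  induction l generalizing p with
  | nil =>
    rcases hp with h | h <;> subst h <;> simp [runsF, transF, List.getLastD]
  | cons a r ih =>
    have ha : a = "+" ∨ a = "-" := hl a (by simp)
    have hr : Sign r := fun x hx => hl x (by simp [hx])
    have ihr := ih hr a ha
    simp only [runsF, transF, getLastD_cons]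
    rcases hp with h | h <;> rcases ha with h' | h' <;> subst h <;> subst h' <;>
      simp at ihr ⊢ <;> omega

theorem alt_eq_mval (s : List String) (hs : Sign s) : num_flips_alt s = mval s := by
  have halt : num_flips_alt s
      = 2 * (0 + runsF false s) - (if s.head? = some "-" then 1 else 0) := by
    simp only [num_flips_alt, foldl_runsF]
  cases s with
  | nil => rw [halt]; simp [runsF, mval]
  | cons a r =>
    rw [halt]
    have hkey := two_runsF (a :: r) hs "+" (Or.inl rfl)
    have hlast : (a :: r).getLastD "+" = (a :: r).getLastD "" :=
      getLastD_irrel _ (List.cons_ne_nil a r) _ _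
    rw [hlast] at hkey
    have ha : a = "+" ∨ a = "-" := hs a (by simp)
    simp only [mval, List.head?_cons]
    rcases ha with h | h <;> subst h <;> simp [transF, runsF] at hkey ⊢ <;> omega

theorem num_flips_no_minus (s : List String) (h : ∀ x ∈ s, x ≠ "-") :
    num_flips s = 0 := by
  have hall : all_flipped s = true := (all_flipped_iff s).2 h
  show num_flips_loop (s.length + 1) s 0 = 0
  simp [num_flips_loop, hall]

theorem alt_no_minus (s : List String) (h : ∀ x ∈ s, x ≠ "-") :
    num_flips_alt s = 0 := by
  simp only [num_flips_alt]
  rw [foldl_runsF s 0 false, runsF_no_minus s h]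
  have hh : ¬ s.head? = some "-" := by
    cases s with
    | nil => simp
    | cons a r => simpa using h a (by simp)
  simp [hh]

-- ===== VERDICT (by name: the statement is the Claim_ definition above) =====
theorem num_flips_spec : Claim_equal_num_flips := by
  intro stack _ hpre
  unfold Spec_num_flips
  rcases hpre with hno | hsign
  · rw [num_flips_no_minus stack hno, alt_no_minus stack hno]
  · rw [alt_eq_mval stack hsign, num_flips,
      loop_eq _ stack 0 hsign (by have := mval_le stack; omega)]
    ring
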